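-- pv_equiv track=rewrite | github.com/pavansaipendry/BabyJay | app/rag/chat.py | _filter_context_by_department
-- ===== SOURCE A (Python) =====
-- def _filter_context_by_department(context: str, department: str) -> str:
--     if not context or "=== FACULTY INFORMATION ===" not in context:
--         return context
--
--     lines = context.split("\n")
--     filtered_lines = []
--     include_current = False
--     buffer = []
--
--     for line in lines:
--         if line.strip() == "=== FACULTY INFORMATION ===":
--             filtered_lines.append(line)
--             include_current = False
--             continue
--
--         if line.strip().startswith("===") and "FACULTY" not in line:
--             if include_current:
--                 filtered_lines.extend(buffer)
--             buffer = []
--             include_current = False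
--             filtered_lines.append(line)
--             continue
--
--         if line.strip().startswith("Professor:"):
--             if include_current:
--                 filtered_lines.extend(buffer)
--             buffer = [line]
--             include_current = False
--             continue
--
--         if line.strip().startswith("Department:"):
--             current_dept = line.strip().replace("Department:", "").strip()
--             buffer.append(line)
--             include_current = department.lower() in current_dept.lower()
--             continue
--
--         buffer.append(line)
--
--     if include_current:
--         filtered_lines.extend(buffer)
--
--     return "\n".join(filtered_lines)
-- ===== SOURCE B (Python) =====
-- def _filter_context_by_department(context: str, department: str) -> str:
--     MARKER = "=== FACULTY INFORMATION ==="
--     if not context or MARKER not in context: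
--         return context
--
--     dep = department.lower()
--     # Pass 1: build an ordered list of segments in flush order:
--     # ("line", text) for header lines, ("block", lines, include) for faculty blocks.
--     segments = []
--     block = []
--     include = False
--     for line in context.split("\n"):
--         s = line.strip()
--         if s == MARKER:
--             segments.append(("line", line))
--             include = False
--         elif s.startswith("===") and "FACULTY" not in line:
--             segments.append(("block", block, include))
--             segments.append(("line", line))
--             block = []
--             include = False
--         elif s.startswith("Professor:"):
--             segments.append(("block", block, include))
--             block = [line]
--             include = False
--         elif s.startswith("Department:"):
--             block.append(line)
--             include = dep in s.replace("Department:", "").strip().lower()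
--         else:
--             block.append(line)
--     segments.append(("block", block, include))
--
--     # Pass 2: emit header lines always, blocks only when included.
--     out = []
--     for seg in segments:
--         if seg[0] == "line":
--             out.append(seg[1])
--         elif seg[2]:
--             out.extend(seg[1])
--     return "\n".join(out)
-- ===== Notes on version B (the rewrite author's own statement) =====
-- stated objective: alternative
-- what changed: B replaces A's interleaved flush-or-discard bookkeeping (conditionally extending the output inside the scanning loop) by a two-pass decomposition: pass 1 builds an ordered segment list of verbatim header lines and faculty blocks tagged with an include flag, pass 2 emits headers always and blocks only when included.
import Mathlib
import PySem

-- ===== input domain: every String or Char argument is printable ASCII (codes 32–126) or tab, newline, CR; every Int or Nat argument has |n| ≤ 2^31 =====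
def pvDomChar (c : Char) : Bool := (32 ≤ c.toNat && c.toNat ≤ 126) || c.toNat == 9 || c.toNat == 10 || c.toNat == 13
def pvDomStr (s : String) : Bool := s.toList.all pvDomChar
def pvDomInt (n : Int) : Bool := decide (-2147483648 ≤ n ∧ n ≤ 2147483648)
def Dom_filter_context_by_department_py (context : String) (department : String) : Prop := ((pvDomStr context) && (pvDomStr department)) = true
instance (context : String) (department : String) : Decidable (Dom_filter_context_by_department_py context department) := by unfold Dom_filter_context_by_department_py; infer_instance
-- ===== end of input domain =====

-- B replaces A's interleaved flush/discard bookkeeping by two passes: pass 1 builds an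
-- ordered list of segments (header lines / faculty blocks with an include flag), pass 2
-- emits headers always and blocks only when included (objective: alternative decomposition).

-- ===== PORT A =====
-- A's single loop over the lines, state = (filtered_lines, include_current, buffer).
def pvA_loop (department : String) : List String → List String → Bool → List String → List String
  | [], fl, inc, buf => if inc then fl ++ buf else fl
  | line :: ls, fl, inc, buf =>
    if PySem.Str.strip line == "=== FACULTY INFORMATION ===" then
      pvA_loop department ls (fl ++ [line]) false buf
    else if PySem.Str.startswith (PySem.Str.strip line) "===" && !(PySem.Str.isIn "FACULTY" line) then
      pvA_loop department ls ((if inc then fl ++ buf else fl) ++ [line]) false []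
    else if PySem.Str.startswith (PySem.Str.strip line) "Professor:" then
      pvA_loop department ls (if inc then fl ++ buf else fl) false [line]
    else if PySem.Str.startswith (PySem.Str.strip line) "Department:" then
      pvA_loop department ls fl
        (PySem.Str.isIn (PySem.Str.lower department)
          (PySem.Str.lower (PySem.Str.strip (PySem.Str.replace (PySem.Str.strip line) "Department:" ""))))
        (buf ++ [line])
    else
      pvA_loop department ls fl inc (buf ++ [line])

def filter_context_by_department_py (context : String) (department : String) : String :=
  if context == "" || !(PySem.Str.isIn "=== FACULTY INFORMATION ===" context) then context
  else PySem.Str.join "\n" (pvA_loop department (((PySem.Str.split? context "\n").getD [])) [] false [])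

-- ===== PORT B =====
-- A segment is a verbatim header line or a faculty block with its include flag.
inductive PvSeg
  | line : String → PvSeg
  | block : List String → Bool → PvSeg
deriving DecidableEq, Repr

-- Pass 1 of B: build the segment list (state = segments, current block, include flag).
def pvB_loop (dep : String) : List String → List PvSeg → List String → Bool → List PvSeg
  | [], segs, blk, inc => segs ++ [.block blk inc]
  | line :: ls, segs, blk, inc =>
    let s := PySem.Str.strip line
    if s == "=== FACULTY INFORMATION ===" then
      pvB_loop dep ls (segs ++ [.line line]) blk false
    else if PySem.Str.startswith s "===" && !(PySem.Str.isIn "FACULTY" line) then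
      pvB_loop dep ls (segs ++ [.block blk inc, .line line]) [] false
    else if PySem.Str.startswith s "Professor:" then
      pvB_loop dep ls (segs ++ [.block blk inc]) [line] false
    else if PySem.Str.startswith s "Department:" then
      pvB_loop dep ls segs (blk ++ [line])
        (PySem.Str.isIn dep (PySem.Str.lower (PySem.Str.strip (PySem.Str.replace s "Department:" ""))))
    else
      pvB_loop dep ls segs (blk ++ [line]) inc

-- Pass 2 of B: emit header lines always, blocks only when included.
def pvB_render : List PvSeg → List String → List String
  | [], out => out
  | .line l :: rest, out => pvB_render rest (out ++ [l])
  | .block bl inc :: rest, out => pvB_render rest (if inc then out ++ bl else out)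

def filter_context_by_department_py_alt (context : String) (department : String) : String :=
  if context == "" || !(PySem.Str.isIn "=== FACULTY INFORMATION ===" context) then context
  else PySem.Str.join "\n"
    (pvB_render (pvB_loop (PySem.Str.lower department) (((PySem.Str.split? context "\n").getD [])) [] [] false) [])

-- ===== PRECONDITION & SPEC =====
def Spec_filter_context_by_department_py (context : String) (department : String) (out : String) : Prop := out = filter_context_by_department_py_alt context department
instance (context : String) (department : String) (out : String) : Decidable (Spec_filter_context_by_department_py context department out) := by unfold Spec_filter_context_by_department_py; infer_instance

-- ===== CLAIM (what is proved, stated in full; the proofs are below) =====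
def Claim_equal_filter_context_by_department_py : Prop := ∀ (context : String) (department : String), Dom_filter_context_by_department_py context department → Spec_filter_context_by_department_py context department (filter_context_by_department_py context department)

-- ===== LEMMAS AND PROOFS =====

lemma pvB_render_acc : ∀ (segs : List PvSeg) (out : List String),
    pvB_render segs out = out ++ pvB_render segs []
  | [], out => by rw [pvB_render, pvB_render]; simp
  | .line l :: rest, out => by
      rw [pvB_render, pvB_render, pvB_render_acc rest (out ++ [l]),
        pvB_render_acc rest ([] ++ [l])]
      simp
  | .block bl inc :: rest, out => by
      rw [pvB_render, pvB_render]
      cases inc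
      · simpa using pvB_render_acc rest out
      · simp only [if_true]
        rw [pvB_render_acc rest (out ++ bl), pvB_render_acc rest ([] ++ bl)]
        simp

lemma pvB_render_append : ∀ (s t : List PvSeg),
    pvB_render (s ++ t) [] = pvB_render s [] ++ pvB_render t []
  | [], t => by rw [pvB_render]; simp
  | .line l :: rest, t => by
      rw [List.cons_append, pvB_render, pvB_render,
        pvB_render_acc (rest ++ t), pvB_render_acc rest, pvB_render_append rest t]
      simp
  | .block bl inc :: rest, t => by
      rw [List.cons_append, pvB_render, pvB_render]
      cases inc
      · simpa using pvB_render_append rest t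
      · simp only [if_true]
        rw [pvB_render_acc (rest ++ t), pvB_render_acc rest, pvB_render_append rest t]
        simp

lemma pv_render_snoc_line (segs : List PvSeg) (l : String) :
    pvB_render (segs ++ [.line l]) [] = pvB_render segs [] ++ [l] := by
  rw [pvB_render_append]; rw [pvB_render, pvB_render]; simp

lemma pv_render_snoc_block (segs : List PvSeg) (bl : List String) (inc : Bool) :
    pvB_render (segs ++ [.block bl inc]) [] = pvB_render segs [] ++ (if inc then bl else []) := by
  rw [pvB_render_append]; rw [pvB_render, pvB_render]; cases inc <;> simp

lemma pv_render_snoc_block_line (segs : List PvSeg) (bl : List String) (inc : Bool) (l : String) :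
    pvB_render (segs ++ [.block bl inc, .line l]) [] =
      (pvB_render segs [] ++ (if inc then bl else [])) ++ [l] := by
  rw [show segs ++ [PvSeg.block bl inc, PvSeg.line l]
      = (segs ++ [PvSeg.block bl inc]) ++ [PvSeg.line l] by simp,
    pv_render_snoc_line, pv_render_snoc_block]

lemma pv_key (department : String) : ∀ (ls : List String) (segs : List PvSeg)
    (blk : List String) (inc : Bool),
    pvA_loop department ls (pvB_render segs []) inc blk =
      pvB_render (pvB_loop (PySem.Str.lower department) ls segs blk inc) [] := by
  intro ls
  induction ls with
  | nil =>
    intro segs blk inc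
    rw [pvA_loop, pvB_loop, pv_render_snoc_block]
    cases inc <;> simp
  | cons line rest ih =>
    intro segs blk inc
    rw [pvA_loop, pvB_loop]
    by_cases h1 : (PySem.Str.strip line == "=== FACULTY INFORMATION ===") = true
    · rw [if_pos h1, if_pos h1, ← pv_render_snoc_line]
      exact ih _ _ _
    · rw [if_neg h1, if_neg h1]
      by_cases h2 : (PySem.Str.startswith (PySem.Str.strip line) "===" &&
          !(PySem.Str.isIn "FACULTY" line)) = true
      · rw [if_pos h2, if_pos h2]
        have : (if inc = true then pvB_render segs [] ++ blk else pvB_render segs []) ++ [line]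
            = pvB_render (segs ++ [.block blk inc, .line line]) [] := by
          rw [pv_render_snoc_block_line]; cases inc <;> simp
        rw [this]
        exact ih _ _ _
      · rw [if_neg h2, if_neg h2]
        by_cases h3 : (PySem.Str.startswith (PySem.Str.strip line) "Professor:") = true
        · rw [if_pos h3, if_pos h3]
          have : (if inc = true then pvB_render segs [] ++ blk else pvB_render segs [])
              = pvB_render (segs ++ [.block blk inc]) [] := by
            rw [pv_render_snoc_block]; cases inc <;> simp
          rw [this]
          exact ih _ _ _
        · rw [if_neg h3, if_neg h3]
          by_cases h4 : (PySem.Str.startswith (PySem.Str.strip line) "Department:") = true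
          · rw [if_pos h4, if_pos h4]
            exact ih _ _ _
          · rw [if_neg h4, if_neg h4]
            exact ih _ _ _

-- ===== VERDICT (by name: the statement is the Claim_ definition above) =====
theorem filter_context_by_department_py_spec : Claim_equal_filter_context_by_department_py := by
  intro context department _
  unfold Spec_filter_context_by_department_py
  unfold filter_context_by_department_py filter_context_by_department_py_alt
  split_ifs with h
  · rfl
  · have hk := pv_key department ((PySem.Str.split? context "\n").getD []) [] [] false
    rw [pvB_render] at hk
    rw [hk]
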